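-- pv_equiv track=rewrite | github.com/havardnyboe/emner-ntnu | TDT4117-InfGjenf/assignment4/task2.py | rank_result
-- ===== SOURCE A (Python) =====
-- def rank_result(res: list[list[int]]):
--     res.sort(key=lambda x: x[0], reverse=True)
--     # combine all lists with the same x[0]
--     for i in range(len(res)):
--         for j in range(i+1, len(res)):
--             if res[i][0] == res[j][0]:
--                 res[i][1] += res[j][1]
--                 res[j][1] = 0
--     # remove all lists with x[1] = 0
--     res = [x for x in res if x[1] != 0]
--     return sorted(res, key=lambda x: x[1], reverse=True)
-- ===== SOURCE B (Python) =====
-- def rank_result(res: list[list[int]]):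
--     # one-pass dict aggregation by key, then two stable sorts (key desc, then total desc)
--     agg = {}
--     for x in res:
--         g = agg.get(x[0])
--         if g is None:
--             agg[x[0]] = x[:]
--         else:
--             g[1] += x[1]
--     groups = [g for g in agg.values() if g[1] != 0]
--     groups.sort(key=lambda g: g[0], reverse=True)
--     groups.sort(key=lambda g: g[1], reverse=True)
--     return groups
-- ===== Notes on version B (the rewrite author's own statement) =====
-- stated objective: alternative
-- what changed: Replaces A's in-place sort followed by a quadratic index-pair duplicate-zeroing loop with a one-pass dict aggregation keyed on x[0], then a filter and two stable sorts (key desc, then total desc); O(n log n) vs A's O(n^2) pair scan, though timing runs varied (1.3x-1.9x at the largest size), so no speed is claimed.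
import Mathlib
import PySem

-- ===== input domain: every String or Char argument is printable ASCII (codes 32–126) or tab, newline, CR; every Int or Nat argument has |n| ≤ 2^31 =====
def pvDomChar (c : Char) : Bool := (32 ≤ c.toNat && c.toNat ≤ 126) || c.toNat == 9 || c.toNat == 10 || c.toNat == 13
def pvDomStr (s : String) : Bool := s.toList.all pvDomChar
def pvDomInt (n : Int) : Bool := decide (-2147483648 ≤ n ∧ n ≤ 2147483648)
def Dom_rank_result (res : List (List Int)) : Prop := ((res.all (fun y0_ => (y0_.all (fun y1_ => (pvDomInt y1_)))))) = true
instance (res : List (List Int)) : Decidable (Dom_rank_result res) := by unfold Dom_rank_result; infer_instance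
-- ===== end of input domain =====

-- B replaces A's in-place sort + quadratic duplicate-zeroing loop by a one-pass dict aggregation and two
-- stable sorts; the equivalence proved is about the RETURN value only (A sorts/mutates its argument in place, B does not).

-- ===== PORT A =====
def rank_result (res : List (List Int)) : List (List Int) :=
  let r := PySem.List.sorted res (fun x => PySem.List.pyGetD x 0 0) true
  let n : Int := r.length
  let r2 := (PySem.List.pyRange 0 n).foldl (fun a i =>
      (PySem.List.pyRange (i+1) n).foldl (fun a j =>
        if PySem.List.pyGetD (PySem.List.pyGetD a i []) 0 0 == PySem.List.pyGetD (PySem.List.pyGetD a j []) 0 0 then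
          let a' := a.set i.toNat ((PySem.List.pyGetD a i []).set 1
              (PySem.List.pyGetD (PySem.List.pyGetD a i []) 1 0 + PySem.List.pyGetD (PySem.List.pyGetD a j []) 1 0))
          a'.set j.toNat ((PySem.List.pyGetD a' j []).set 1 0)
        else a) a) r
  let r3 := r2.filter (fun x => PySem.List.pyGetD x 1 0 != 0)
  PySem.List.sorted r3 (fun x => PySem.List.pyGetD x 1 0) true

-- ===== PORT B =====
def rank_result_alt (res : List (List Int)) : List (List Int) :=
  let agg := res.foldl (fun (d : PySem.Dict Int (List Int)) x =>
      match d.get? (PySem.List.pyGetD x 0 0) with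
      | none => d.insert (PySem.List.pyGetD x 0 0) x
      | some g => d.insert (PySem.List.pyGetD x 0 0)
          (g.set 1 (PySem.List.pyGetD g 1 0 + PySem.List.pyGetD x 1 0))) PySem.Dict.empty
  let groups := agg.values.filter (fun g => PySem.List.pyGetD g 1 0 != 0)
  let groups2 := PySem.List.sorted groups (fun g => PySem.List.pyGetD g 0 0) true
  PySem.List.sorted groups2 (fun g => PySem.List.pyGetD g 1 0) true

-- ===== PRECONDITION & SPEC =====
-- Pre_ excludes exactly the inputs on which the Python A raises IndexError: some row shorter than 2.
def Pre_rank_result (res : List (List Int)) : Prop := ∀ x ∈ res, 2 ≤ x.length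
instance (res : List (List Int)) : Decidable (Pre_rank_result res) := by unfold Pre_rank_result; infer_instance
def pvWitness_rank_result : List (List Int) := [[1, 2], [1, 3], [2, 0], [5, -1]]

def Spec_rank_result (res : List (List Int)) (out : List (List Int)) : Prop := out = rank_result_alt res
instance (res : List (List Int)) (out : List (List Int)) : Decidable (Spec_rank_result res out) := by unfold Spec_rank_result; infer_instance

-- ===== CLAIM (what is proved, stated in full; the proofs are below) =====
def Claim_equal_rank_result : Prop := ∀ (res : List (List Int)), Dom_rank_result res → Pre_rank_result res → Spec_rank_result res (rank_result res)

-- ===== LEMMAS AND PROOFS =====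

-- key, value and value-update of a row (indices 0 and 1)
def pvK (x : List Int) : Int := x.getD 0 0
def pvV (x : List Int) : Int := x.getD 1 0
def pvS (x : List Int) (v : Int) : List Int := x.set 1 v

-- one step of A's inner loop, Nat-indexed
def aStep (a : List (List Int)) (i j : Nat) : List (List Int) :=
  if pvK (a.getD i []) = pvK (a.getD j []) then
    let a' := a.set i (pvS (a.getD i []) (pvV (a.getD i []) + pvV (a.getD j [])))
    a'.set j (pvS (a'.getD j []) 0)
  else a

-- A's whole combine pass, Nat-indexed (n is fixed at the start, as in the Python)
def combineN (n : Nat) (a : List (List Int)) : List (List Int) :=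
  (List.range n).foldl (fun b i => (List.range (n - (i+1))).foldl (fun c m => aStep c i (i+1+m)) b) a

-- zero the value of every row with key k
def pvZ (k : Int) (y : List Int) : List Int := if pvK y = k then pvS y 0 else y

-- structural description of A's combine pass
def combineSpec : List (List Int) → List (List Int)
  | [] => []
  | x :: t =>
    pvS x (pvV x + ((t.filter (fun y => pvK y = pvK x)).map pvV).sum)
      :: combineSpec (t.map (pvZ (pvK x)))
termination_by l => l.length
decreasing_by simp

-- first occurrence of each key, in order
def reps : List (List Int) → List (List Int)
  | [] => []
  | x :: t => x :: reps (t.filter (fun y => !(pvK y == pvK x)))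
termination_by l => l.length
decreasing_by
  simp only [List.length_unattach]
  exact Nat.lt_succ_of_le (le_trans (List.length_filter_le _ _) (Nat.le_of_eq List.length_attach))

-- the aggregated record for representative x over list l
def rec0 (l : List (List Int)) (x : List Int) : List Int :=
  pvS x (((l.filter (fun y => pvK y = pvK x)).map pvV).sum)

-- ---------- basic row lemmas ----------
theorem pvK_pvS (x : List Int) (v : Int) : pvK (pvS x v) = pvK x := by
  cases x with
  | nil => rfl
  | cons a t => simp [pvK, pvS]

theorem pvS_pvS (x : List Int) (a b : Int) : pvS (pvS x a) b = pvS x b := by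
  simp [pvS, List.set_set]

theorem pvS_pvV_self (x : List Int) : pvS x (pvV x) = x := by
  match x with
  | [] => rfl
  | [a] => rfl
  | a :: b :: t => simp [pvS, pvV]

theorem length_pvS (x : List Int) (v : Int) : (pvS x v).length = x.length := by
  simp [pvS]

theorem pvV_pvS (x : List Int) (v : Int) (h : 2 ≤ x.length) : pvV (pvS x v) = v := by
  match x with
  | a :: b :: t => simp [pvS, pvV]

theorem pvS_short (x : List Int) (v : Int) (h : x.length ≤ 1) : pvS x v = x := by
  match x with
  | [] => rfl
  | [a] => rfl

theorem pvK_pvZ (k : Int) (y : List Int) : pvK (pvZ k y) = pvK y := by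
  unfold pvZ; split <;> simp [pvK_pvS]

theorem length_pvZ (k : Int) (y : List Int) : (pvZ k y).length = y.length := by
  unfold pvZ; split <;> simp [length_pvS]

-- ---------- translating A's Int-indexed loops to Nat-indexed ones ----------
theorem pyRange_cast (a b : Nat) :
    PySem.List.pyRange (a : Int) (b : Int) = (List.range (b - a)).map (fun m => ((a + m : Nat) : Int)) := by
  rcases Nat.lt_or_ge a b with h | h
  · have h1 : (a:Int) < (b:Int) := by exact_mod_cast h
    have h2 : ((b:Int) - a + 1 - 1) / 1 = (b - a : Nat) := by omega
    simp only [PySem.List.pyRange, if_neg one_ne_zero, if_pos zero_lt_one, if_pos h1, h2]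
    rw [Int.toNat_natCast]
    apply List.map_congr_left
    intro m hm
    push_cast; ring
  · have h1 : ¬((a:Int) < (b:Int)) := by exact_mod_cast not_lt.2 h
    have h2 : b - a = 0 := by omega
    simp [PySem.List.pyRange, h1, h2]
theorem stepA_cast (a : List (List Int)) (k j : Nat) :
    (if PySem.List.pyGetD (PySem.List.pyGetD a (k : Int) []) 0 0 == PySem.List.pyGetD (PySem.List.pyGetD a (j : Int) []) 0 0 then
      let a' := a.set ((k : Int)).toNat ((PySem.List.pyGetD a (k : Int) []).set 1
          (PySem.List.pyGetD (PySem.List.pyGetD a (k : Int) []) 1 0 + PySem.List.pyGetD (PySem.List.pyGetD a (j : Int) []) 1 0))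
      a'.set ((j : Int)).toNat ((PySem.List.pyGetD a' (j : Int) []).set 1 0)
    else a) = aStep a k j := by
  simp [aStep, pvK, pvV, pvS, PySem.List.pyGetD_natCast, PySem.List.pyGetD_ofNat', Int.toNat_natCast, beq_iff_eq]
theorem portA_combine (r : List (List Int)) :
    (PySem.List.pyRange 0 ((r.length : Int))).foldl (fun a i =>
      (PySem.List.pyRange (i+1) ((r.length : Int))).foldl (fun a j =>
        if PySem.List.pyGetD (PySem.List.pyGetD a i []) 0 0 == PySem.List.pyGetD (PySem.List.pyGetD a j []) 0 0 then
          let a' := a.set i.toNat ((PySem.List.pyGetD a i []).set 1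
              (PySem.List.pyGetD (PySem.List.pyGetD a i []) 1 0 + PySem.List.pyGetD (PySem.List.pyGetD a j []) 1 0))
          a'.set j.toNat ((PySem.List.pyGetD a' j []).set 1 0)
        else a) a) r = combineN r.length r := by
  rw [PySem.List.pyRange_zero_natCast, List.foldl_map]
  unfold combineN
  apply PySem.List.foldl_congr_mem
  intro acc k hk
  have hcast : ((k : Int) + 1) = (((k+1 : Nat)) : Int) := by push_cast; ring
  rw [hcast, pyRange_cast (k+1) r.length, List.foldl_map]
  apply PySem.List.foldl_congr_mem
  intro acc2 m hm
  exact stepA_cast acc2 k (k+1+m)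
-- ---------- peeling A's combine loop ----------
theorem foldl_cons_shift {β : Type} (F G : List (List Int) → β → List (List Int)) (σ : β → β) (x : List Int) :
    ∀ (l : List β) (t : List (List Int)), (∀ s i, i ∈ l → F (x :: s) i = x :: G s (σ i)) →
    l.foldl F (x :: t) = x :: (l.map σ).foldl G t := by
  intro l
  induction l with
  | nil => intro t _; simp
  | cons i l ih =>
      intro t h
      have h0 := h t i (by simp)
      simp only [List.foldl_cons, List.map_cons, h0]
      exact ih _ (fun s i' hi' => h s i' (by simp [hi']))

theorem aStep_cons (z : List Int) (s : List (List Int)) (i j : Nat) :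
    aStep (z :: s) (i+1) (j+1) = z :: aStep s i j := by
  simp only [aStep, List.getD_cons_succ, List.set_cons_succ]
  split <;> rfl
theorem set_append_mid (pre t : List (List Int)) (y v : List Int) :
    (pre ++ y :: t).set pre.length v = pre ++ v :: t := by
  induction pre with
  | nil => rfl
  | cons a pre ih => simp [List.set_cons_succ, ih]

theorem getD_append_mid (pre t : List (List Int)) (y : List Int) :
    (pre ++ y :: t).getD pre.length [] = y := by
  induction pre with
  | nil => rfl
  | cons a pre ih => rw [List.cons_append, List.length_cons, List.getD_cons_succ]; exact ih

theorem inner_zero : ∀ (t pre : List (List Int)) (x : List Int),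
    (List.range t.length).foldl (fun c m => aStep c 0 (1 + pre.length + m)) (x :: (pre ++ t))
    = pvS x (pvV x + ((t.filter (fun y => pvK y = pvK x)).map pvV).sum) :: (pre ++ t.map (pvZ (pvK x))) := by
  intro t
  induction t with
  | nil =>
      intro pre x
      simp [pvS_pvV_self]
  | cons y t ih =>
      intro pre x
      rw [List.length_cons, List.range_succ_eq_map, List.foldl_cons, List.foldl_map]
      have hidx : 1 + pre.length + 0 = pre.length + 1 := by omega
      have hrest : ∀ (x' y' : List Int),
          (List.range t.length).foldl (fun c m => aStep c 0 (1 + pre.length + Nat.succ m)) (x' :: (pre ++ y' :: t))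
          = pvS x' (pvV x' + ((t.filter (fun y_1 => pvK y_1 = pvK x')).map pvV).sum)
              :: (pre ++ y' :: t.map (pvZ (pvK x'))) := by
        intro x' y'
        have hfun : (fun (c : List (List Int)) (m : Nat) => aStep c 0 (1 + pre.length + Nat.succ m))
            = (fun c m => aStep c 0 (1 + (pre ++ [y']).length + m)) := by
          funext c m
          congr 1
          simp
          omega
        have harr : x' :: (pre ++ y' :: t) = x' :: ((pre ++ [y']) ++ t) := by simp
        rw [hfun, harr, ih (pre ++ [y']) x']
        simp
      have hget : (x :: (pre ++ y :: t)).getD (1 + pre.length + 0) [] = y := by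
        rw [hidx, List.getD_cons_succ, getD_append_mid]
      by_cases hxy : pvK x = pvK y
      · have hstep : aStep (x :: (pre ++ y :: t)) 0 (1 + pre.length + 0)
            = pvS x (pvV x + pvV y) :: (pre ++ pvS y 0 :: t) := by
          unfold aStep
          rw [if_pos]
          · simp only [List.getD_cons_zero, List.set_cons_zero, hget]
            rw [hidx, List.set_cons_succ, set_append_mid]
            have hget2' : (pvS x (pvV x + pvV y) :: (pre ++ y :: t)).getD (pre.length + 1) [] = y := by
              rw [List.getD_cons_succ, getD_append_mid]
            rw [hget2']
          · simp only [List.getD_cons_zero, hget]; exact hxy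
        rw [hstep, hrest, pvK_pvS, pvS_pvS]
        have hz : pvZ (pvK x) y = pvS y 0 := by unfold pvZ; rw [if_pos hxy.symm]
        have hfy : pvK y = pvK x := hxy.symm
        simp only [List.filter_cons, hfy, decide_true, if_true, List.map_cons, List.sum_cons, hz]
        congr 1
        by_cases hlen : 2 ≤ x.length
        · rw [pvV_pvS _ _ hlen, add_assoc]
        · have hx1 : x.length ≤ 1 := by omega
          rw [pvS_short x _ hx1, pvS_short x _ hx1]
      · have hstep : aStep (x :: (pre ++ y :: t)) 0 (1 + pre.length + 0) = x :: (pre ++ y :: t) := by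
          unfold aStep
          rw [if_neg]
          simp only [List.getD_cons_zero, hget]
          exact hxy
        rw [hstep, hrest]
        have hz : pvZ (pvK x) y = y := by unfold pvZ; rw [if_neg (fun h => hxy h.symm)]
        have hy : ¬(pvK y = pvK x) := fun h => hxy h.symm
        simp [hy, hz]
theorem combineN_cons (x : List Int) (t : List (List Int)) :
    combineN (t.length + 1) (x :: t)
    = pvS x (pvV x + ((t.filter (fun y => pvK y = pvK x)).map pvV).sum)
        :: combineN t.length (t.map (pvZ (pvK x))) := by
  unfold combineN
  rw [List.range_succ_eq_map, List.foldl_cons]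
  have hfirst : (List.range (t.length + 1 - (0+1))).foldl (fun c m => aStep c 0 (0+1+m)) (x :: t)
      = pvS x (pvV x + ((t.filter (fun y => pvK y = pvK x)).map pvV).sum) :: t.map (pvZ (pvK x)) := by
    have h0 : t.length + 1 - (0+1) = t.length := by omega
    have h1 : (fun (c : List (List Int)) (m : Nat) => aStep c 0 (0+1+m))
        = (fun c m => aStep c 0 (1 + ([] : List (List Int)).length + m)) := by
      funext c m
      have hh : 0+1+m = 1 + ([] : List (List Int)).length + m := by simp
      rw [hh]
    rw [h0, h1]
    have := inner_zero t [] x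
    simpa using this
  rw [hfirst]
  rw [foldl_cons_shift _ (fun b i => (List.range (t.length - (i+1))).foldl (fun c m => aStep c i (i+1+m)) b)
      (fun i => i - 1) _ _ _ ?_]
  · have hmap : (List.map Nat.succ (List.range t.length)).map (fun i => i - 1) = List.range t.length := by
      rw [List.map_map]
      have h2 : ((fun i => i - 1) ∘ Nat.succ) = id := by funext n; simp
      rw [h2, List.map_id]
    rw [hmap]
  · intro s i hi
    rcases List.mem_map.1 hi with ⟨k, hk, rfl⟩
    beta_reduce
    have hk1 : Nat.succ k - 1 = k := by omega
    have hrange : t.length + 1 - (Nat.succ k + 1) = t.length - (k+1) := by omega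
    rw [hk1, hrange]
    rw [foldl_cons_shift _ (fun c m => aStep c k (k+1+m)) (fun m => m) _ _ _ ?_]
    · rw [List.map_id']
    · intro s' m _
      have h3 : Nat.succ k + 1 + m = (k + 1 + m) + 1 := by omega
      rw [h3]
      exact aStep_cons _ s' k (k+1+m)
theorem combineN_eq_spec : ∀ (a : List (List Int)), combineN a.length a = combineSpec a := by
  intro a
  induction hn : a.length using Nat.strong_induction_on generalizing a with
  | _ n ih =>
    cases a with
    | nil => subst hn; simp [combineN, combineSpec]
    | cons x t =>
        subst hn
        rw [List.length_cons, combineN_cons]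
        have hlt : (t.map (pvZ (pvK x))).length < t.length + 1 := by simp
        have := ih (t.map (pvZ (pvK x))).length (by simp) (t.map (pvZ (pvK x))) rfl
        rw [combineSpec]
        simp only [List.length_map] at this
        rw [this]
-- ---------- reps lemmas ----------
theorem reps_subset : ∀ (l : List (List Int)) (x : List Int), x ∈ reps l → x ∈ l := by
  intro l
  induction hn : l.length using Nat.strong_induction_on generalizing l with
  | _ n ih =>
    cases l with
    | nil => intro x hx; simp [reps] at hx
    | cons a t =>
        subst hn
        intro x hx
        rw [reps] at hx
        rcases List.mem_cons.1 hx with rfl | hx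
        · exact List.mem_cons_self
        · have hlen : (t.filter (fun y => !(pvK y == pvK a))).length < (a :: t).length :=
            Nat.lt_succ_of_le (List.length_filter_le _ _)
          have := ih _ hlen _ rfl x hx
          exact List.mem_cons_of_mem _ (List.mem_of_mem_filter this)
theorem reps_sublist : ∀ (l : List (List Int)), (reps l).Sublist l := by
  intro l
  induction hn : l.length using Nat.strong_induction_on generalizing l with
  | _ n ih =>
    cases l with
    | nil => simp [reps]
    | cons a t =>
        subst hn
        rw [reps]
        refine List.Sublist.cons₂ a ?_
        have hlen : (t.filter (fun y => !(pvK y == pvK a))).length < (a :: t).length :=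
          Nat.lt_succ_of_le (List.length_filter_le _ _)
        exact (ih _ hlen _ rfl).trans (List.filter_sublist)
theorem reps_keys_pairwise : ∀ (l : List (List Int)), (reps l).Pairwise (fun a b => pvK a ≠ pvK b) := by
  intro l
  induction hn : l.length using Nat.strong_induction_on generalizing l with
  | _ n ih =>
    cases l with
    | nil => simp [reps]
    | cons a t =>
        subst hn
        rw [reps]
        have hlen : (t.filter (fun y => !(pvK y == pvK a))).length < (a :: t).length :=
          Nat.lt_succ_of_le (List.length_filter_le _ _)
        refine List.Pairwise.cons ?_ (ih _ hlen _ rfl)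
        intro y hy
        have := reps_subset _ _ hy
        have := List.mem_filter.1 this
        simp only [Bool.not_eq_eq_eq_not, Bool.not_true, beq_eq_false_iff_ne] at this
        exact fun h => this.2 (h ▸ rfl)
theorem reps_map (f : List Int → List Int) (hk : ∀ y, pvK (f y) = pvK y) :
    ∀ (l : List (List Int)), reps (l.map f) = (reps l).map f := by
  intro l
  induction hn : l.length using Nat.strong_induction_on generalizing l with
  | _ n ih =>
    cases l with
    | nil => simp [reps]
    | cons a t =>
        subst hn
        rw [List.map_cons, reps, reps]
        have hfil : (t.map f).filter (fun y => !(pvK y == pvK (f a)))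
            = (t.filter (fun y => !(pvK y == pvK a))).map f := by
          rw [List.filter_map]
          congr 1
          apply List.filter_congr
          intro y hy
          simp [Function.comp, hk]
        rw [hfil]
        have hlen : (t.filter (fun y => !(pvK y == pvK a))).length < (a :: t).length :=
          Nat.lt_succ_of_le (List.length_filter_le _ _)
        rw [ih _ hlen _ rfl]
        simp
theorem reps_filter_ne (k : Int) : ∀ (l : List (List Int)),
    reps (l.filter (fun y => !(pvK y == k))) = (reps l).filter (fun y => !(pvK y == k)) := by
  intro l
  induction hn : l.length using Nat.strong_induction_on generalizing l with
  | _ n ih =>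
    cases l with
    | nil => simp [reps]
    | cons a t =>
        subst hn
        have hlen : ∀ (p : List Int → Bool), (t.filter p).length < (a :: t).length :=
          fun p => Nat.lt_succ_of_le (List.length_filter_le _ _)
        by_cases ha : pvK a = k
        · have h1 : (a :: t).filter (fun y => !(pvK y == k)) = t.filter (fun y => !(pvK y == k)) := by
            simp [ha]
          have h2 : (fun (y : List Int) => !(pvK y == pvK a)) = (fun y => !(pvK y == k)) := by
            funext y; rw [ha]
          rw [h1, reps, List.filter_cons]  -- 
          simp only [ha, beq_self_eq_true, Bool.not_true]
          rw [if_neg (by simp)]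
          symm
          apply List.filter_eq_self.2
          intro y hy
          have := List.mem_filter.1 (reps_subset _ _ hy)
          exact this.2
        · have h2 : (fun (y : List Int) => !(pvK y == pvK a)) = (fun y => !(pvK y == pvK a)) := rfl
          rw [List.filter_cons]
          rw [if_pos (by simp [ha])]
          rw [reps, reps, List.filter_cons, if_pos (by simp [ha])]
          congr 1
          have e1 : (t.filter (fun y => !(pvK y == k))).filter (fun y => !(pvK y == pvK a))
              = (t.filter (fun y => !(pvK y == pvK a))).filter (fun y => !(pvK y == k)) := by
            rw [List.filter_filter, List.filter_filter]
            exact List.filter_congr (fun y _ => Bool.and_comm _ _)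
          rw [e1]
          exact ih _ (hlen _) _ rfl
theorem reps_mem_iff : ∀ (l : List (List Int)) (x : List Int),
    x ∈ reps l ↔ (l.filter (fun y => pvK y == pvK x)).head? = some x := by
  intro l
  induction hn : l.length using Nat.strong_induction_on generalizing l with
  | _ n ih =>
    cases l with
    | nil => intro x; simp [reps]
    | cons a t =>
        subst hn
        intro x
        have hlen : ∀ (p : List Int → Bool), (t.filter p).length < (a :: t).length :=
          fun p => Nat.lt_succ_of_le (List.length_filter_le _ _)
        rw [reps, List.filter_cons]
        by_cases hax : pvK a = pvK x
        · rw [if_pos (by simp [hax])]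
          simp only [List.head?_cons, List.mem_cons]
          constructor
          · rintro (rfl | hx)
            · rfl
            · have := reps_subset _ _ hx
              have := (List.mem_filter.1 this).2
              simp only [Bool.not_eq_eq_eq_not, Bool.not_true, beq_eq_false_iff_ne] at this
              exact absurd hax this.symm
          · rintro h; exact Or.inl (Option.some.inj h).symm
        · rw [if_neg (by simp [hax])]
          have hpred : (fun y => (pvK y == pvK x) && (!(pvK y == pvK a))) = (fun (y : List Int) => pvK y == pvK x) := by
            funext y
            by_cases h : (pvK y == pvK x)
            · have h' := eq_of_beq h
              have h2 : (pvK y == pvK a) = false := by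
                apply beq_eq_false_iff_ne.2
                rw [h']
                exact fun hh => hax hh.symm
              simp [h, h2]
            · simp [h]
          simp only [List.mem_cons]
          constructor
          · rintro (rfl | hx)
            · exact absurd rfl hax
            · have h1 := (ih _ (hlen _) _ rfl x).1 hx
              rw [List.filter_filter, hpred] at h1
              exact h1
          · intro h
            right
            apply (ih _ (hlen _) _ rfl x).2
            rw [List.filter_filter, hpred]
            exact h
theorem reps_exists_key : ∀ (l : List (List Int)) (k : Int),
    (∃ y ∈ l, pvK y = k) → ∃ w ∈ reps l, pvK w = k := by
  intro l
  induction hn : l.length using Nat.strong_induction_on generalizing l with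
  | _ n ih =>
    cases l with
    | nil => intro k h; simp at h
    | cons a t =>
        subst hn
        intro k h
        rw [reps]
        by_cases hak : pvK a = k
        · exact ⟨a, by simp, hak⟩
        · rcases h with ⟨y, hy, hyk⟩
          rcases List.mem_cons.1 hy with rfl | hyt
          · exact absurd hyk hak
          · have hyf : y ∈ t.filter (fun y => !(pvK y == pvK a)) := by
              apply List.mem_filter.2 ⟨hyt, ?_⟩
              simp only [Bool.not_eq_eq_eq_not, Bool.not_true, beq_eq_false_iff_ne]
              rw [hyk]; exact fun hh => hak (hh ▸ rfl)
            have hlen : (t.filter (fun y => !(pvK y == pvK a))).length < (a :: t).length :=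
              Nat.lt_succ_of_le (List.length_filter_le _ _)
            rcases ih _ hlen _ rfl k ⟨y, hyf, hyk⟩ with ⟨w, hw, hwk⟩
            exact ⟨w, List.mem_cons_of_mem _ hw, hwk⟩
theorem reps_append_fresh (z : List Int) : ∀ (p : List (List Int)),
    (∀ y ∈ p, pvK y ≠ pvK z) → reps (p ++ [z]) = reps p ++ [z] := by
  intro p
  induction hn : p.length using Nat.strong_induction_on generalizing p with
  | _ n ih =>
    cases p with
    | nil => intro _; simp [reps]
    | cons a t =>
        subst hn
        intro h
        rw [List.cons_append, reps, reps]
        rw [List.filter_append]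
        have hz : [z].filter (fun y => !(pvK y == pvK a)) = [z] := by
          simp only [List.filter_cons, List.filter_nil]
          rw [if_pos]
          simp only [Bool.not_eq_eq_eq_not, Bool.not_true, beq_eq_false_iff_ne]
          exact fun hh => h a (by simp) hh.symm
        rw [hz]
        have hlen : (t.filter (fun y => !(pvK y == pvK a))).length < (a :: t).length :=
          Nat.lt_succ_of_le (List.length_filter_le _ _)
        rw [ih _ hlen _ rfl (fun y hy => h y (List.mem_cons_of_mem _ (List.mem_of_mem_filter hy)))]
        simp
theorem reps_append_dup (z : List Int) : ∀ (p : List (List Int)),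
    (∃ y ∈ p, pvK y = pvK z) → reps (p ++ [z]) = reps p := by
  intro p
  induction hn : p.length using Nat.strong_induction_on generalizing p with
  | _ n ih =>
    cases p with
    | nil => intro h; simp at h
    | cons a t =>
        subst hn
        intro h
        rw [List.cons_append, reps, reps, List.filter_append]
        by_cases haz : pvK a = pvK z
        · have hz : [z].filter (fun y => !(pvK y == pvK a)) = [] := by
            simp [haz]
          rw [hz, List.append_nil]
        · have hz : [z].filter (fun y => !(pvK y == pvK a)) = [z] := by
            simp only [List.filter_cons, List.filter_nil]
            rw [if_pos]
            simp only [Bool.not_eq_eq_eq_not, Bool.not_true, beq_eq_false_iff_ne]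
            exact fun hh => haz hh.symm
          rw [hz]
          have hlen : (t.filter (fun y => !(pvK y == pvK a))).length < (a :: t).length :=
            Nat.lt_succ_of_le (List.length_filter_le _ _)
          rcases h with ⟨y, hy, hyk⟩
          rcases List.mem_cons.1 hy with rfl | hyt
          · exact absurd hyk haz
          · have hyf : y ∈ t.filter (fun y => !(pvK y == pvK a)) := by
              apply List.mem_filter.2 ⟨hyt, ?_⟩
              simp only [Bool.not_eq_eq_eq_not, Bool.not_true, beq_eq_false_iff_ne]
              rw [hyk]; exact fun hh => haz (hh ▸ rfl)
            rw [ih _ hlen _ rfl ⟨y, hyf, hyk⟩]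
-- ---------- the filtered combine result ----------
theorem filter_map_split {α β : Type} : ∀ (l : List β) (f g : β → α) (p : α → Bool) (q : β → Bool),
    (∀ y ∈ l, q y = true → f y = g y) → (∀ y ∈ l, q y = false → p (f y) = false) →
    (l.map f).filter p = ((l.filter q).map g).filter p := by
  intro l f g p q h1 h2
  induction l with
  | nil => rfl
  | cons y l ih =>
      have ih' := ih (fun z hz => h1 z (List.mem_cons_of_mem _ hz)) (fun z hz => h2 z (List.mem_cons_of_mem _ hz))
      cases hq : q y with
      | true =>
          simp only [List.map_cons, List.filter_cons, hq, if_pos, h1 y (by simp) hq, List.map_cons]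
          rw [ih']
      | false =>
          simp only [List.map_cons, List.filter_cons, hq, h2 y (by simp) hq]
          simp only [Bool.false_eq_true, if_false]
          exact ih' 

theorem step2 : ∀ (l : List (List Int)), (∀ y ∈ l, 2 ≤ y.length) →
    (combineSpec l).filter (fun x => pvV x != 0)
    = ((reps l).map (rec0 l)).filter (fun x => pvV x != 0) := by
  intro l
  induction hn : l.length using Nat.strong_induction_on generalizing l with
  | _ n ih =>
    cases l with
    | nil => intro _; simp [combineSpec, reps]
    | cons x t =>
        subst hn
        intro hlen2
        rw [combineSpec, reps, List.map_cons]
        have hhead : pvS x (pvV x + ((t.filter (fun y => pvK y = pvK x)).map pvV).sum) = rec0 (x :: t) x := by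
          unfold rec0
          simp
        rw [hhead]
        have htail : (combineSpec (t.map (pvZ (pvK x)))).filter (fun z => pvV z != 0)
            = ((reps (t.filter (fun y => !(pvK y == pvK x)))).map (rec0 (x :: t))).filter (fun z => pvV z != 0) := by
          have hlenz : ∀ y ∈ t.map (pvZ (pvK x)), 2 ≤ y.length := by
            intro y hy
            rcases List.mem_map.1 hy with ⟨z, hz, rfl⟩
            rw [length_pvZ]
            exact hlen2 z (List.mem_cons_of_mem _ hz)
          have hlt : (t.map (pvZ (pvK x))).length < (x :: t).length := by simp
          have ihz := ih _ hlt _ rfl hlenz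
          rw [ihz]
          rw [reps_map (pvZ (pvK x)) (pvK_pvZ _) t, List.map_map]
          have hsplit := filter_map_split (reps t)
            (rec0 (t.map (pvZ (pvK x))) ∘ pvZ (pvK x)) (rec0 (x :: t))
            (fun z => pvV z != 0) (fun y => !(pvK y == pvK x)) ?_ ?_
          · rw [hsplit, reps_filter_ne]
          · -- on other keys the record is unchanged
            intro y hy hq
            simp only [Bool.not_eq_eq_eq_not, Bool.not_true, beq_eq_false_iff_ne] at hq
            have hzy : pvZ (pvK x) y = y := by unfold pvZ; rw [if_neg (fun h => hq h)]
            have hclass : (t.map (pvZ (pvK x))).filter (fun z => pvK z = pvK y)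
                = t.filter (fun z => pvK z = pvK y) := by
              rw [List.filter_map]
              have hcomp : ((fun z => decide (pvK z = pvK y)) ∘ pvZ (pvK x))
                  = (fun z => decide (pvK z = pvK y)) := by
                funext z
                simp [Function.comp, pvK_pvZ]
              rw [hcomp]
              have hid : ∀ z ∈ t.filter (fun z => decide (pvK z = pvK y)), pvZ (pvK x) z = id z := by
                intro z hz
                have hzk : pvK z = pvK y := of_decide_eq_true (List.mem_filter.1 hz).2
                unfold pvZ
                rw [if_neg]
                · rfl
                · rw [hzk]; exact fun h => hq h
              rw [List.map_congr_left hid, List.map_id]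
            simp only [Function.comp]
            unfold rec0
            rw [hzy, hclass]
            rw [List.filter_cons]
            simp only [decide_eq_true_eq]
            rw [if_neg (fun h => hq h.symm)]
          · -- records for the key of x have value 0 and are filtered out
            intro y hy hq
            replace hq : pvK y = pvK x := by simpa using hq
            have h2y : 2 ≤ y.length := hlen2 y (List.mem_cons_of_mem _ (reps_subset _ _ hy))
            have hzy : pvZ (pvK x) y = pvS y 0 := by unfold pvZ; rw [if_pos hq]
            have hsum : (((t.map (pvZ (pvK x))).filter (fun z => decide (pvK z = pvK (pvS y 0)))).map pvV).sum = 0 := by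
              apply List.sum_eq_zero
              intro v hv
              rcases List.mem_map.1 hv with ⟨z, hz, rfl⟩
              rcases List.mem_filter.1 hz with ⟨hz1, hz2⟩
              rcases List.mem_map.1 hz1 with ⟨w, hw, rfl⟩
              have hwx : pvK w = pvK x := by
                have h3 := of_decide_eq_true hz2
                rw [pvK_pvZ, pvK_pvS] at h3
                rw [h3, hq]
              have hzw : pvZ (pvK x) w = pvS w 0 := by unfold pvZ; rw [if_pos hwx]
              rw [hzw, pvV_pvS _ _ (hlen2 w (List.mem_cons_of_mem _ hw))]
            simp only [Function.comp]
            rw [hzy]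
            unfold rec0
            rw [hsum, pvS_pvS, pvV_pvS _ _ h2y]
            simp
        rw [List.filter_cons, List.filter_cons, htail]

-- ---------- B's dict aggregation ----------
theorem rec0_append_same (p : List (List Int)) (z x : List Int) (h : pvK z = pvK x) :
    rec0 (p ++ [z]) x = pvS x ((((p.filter (fun y => pvK y = pvK x)).map pvV).sum) + pvV z) := by
  unfold rec0
  rw [List.filter_append]
  have hz : [z].filter (fun y => decide (pvK y = pvK x)) = [z] := by simp [h]
  rw [hz, List.map_append, List.sum_append]
  simp

theorem rec0_append_other (p : List (List Int)) (z x : List Int) (h : pvK z ≠ pvK x) :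
    rec0 (p ++ [z]) x = rec0 p x := by
  unfold rec0
  rw [List.filter_append]
  have hz : [z].filter (fun y => decide (pvK y = pvK x)) = [] := by simp [h]
  rw [hz, List.append_nil]

theorem find?_unique {α : Type} : ∀ (l : List α) (q : α → Bool) (w : α), w ∈ l → q w = true →
    (∀ v ∈ l, q v = true → v = w) → l.find? q = some w := by
  intro l q w hw hq huniq
  induction l with
  | nil => simp at hw
  | cons a l ih =>
      by_cases ha : q a = true
      · rw [List.find?_cons_of_pos ha]
        rw [huniq a (by simp) ha]
      · rw [List.find?_cons_of_neg ha]
        rcases List.mem_cons.1 hw with rfl | hw'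
        · exact absurd hq ha
        · exact ih hw' (fun v hv hqv => huniq v (List.mem_cons_of_mem _ hv) hqv)

theorem dict_invariant : ∀ (p : List (List Int)), (∀ y ∈ p, 2 ≤ y.length) →
    (p.foldl (fun (d : PySem.Dict Int (List Int)) x =>
      match d.get? (pvK x) with
      | none => d.insert (pvK x) x
      | some g => d.insert (pvK x) (pvS g (pvV g + pvV x))) PySem.Dict.empty).items
    = (reps p).map (fun x => (pvK x, rec0 p x)) := by
  intro p
  induction p using List.reverseRecOn with
  | nil => intro _; simp [reps, PySem.Dict.empty]
  | append_singleton p z ih =>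
      intro hlen2
      have hlen2p : ∀ y ∈ p, 2 ≤ y.length := fun y hy => hlen2 y (by simp [hy])
      have hz2 : 2 ≤ z.length := hlen2 z (by simp)
      have hd : (p.foldl (fun (d : PySem.Dict Int (List Int)) x =>
          match d.get? (pvK x) with
          | none => d.insert (pvK x) x
          | some g => d.insert (pvK x) (pvS g (pvV g + pvV x))) PySem.Dict.empty)
          = PySem.Dict.mk ((reps p).map (fun x => (pvK x, rec0 p x))) := by
        apply PySem.Dict.ext
        simpa using ih hlen2p
      rw [List.foldl_append, List.foldl_cons, List.foldl_nil, hd]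
      by_cases hfresh : ∀ y ∈ p, pvK y ≠ pvK z
      · -- new key: appended at the end
        have hget : (PySem.Dict.mk ((reps p).map (fun x => (pvK x, rec0 p x)))).get? (pvK z) = none := by
          unfold PySem.Dict.get?
          rw [List.find?_eq_none.2]
          · rfl
          · intro pr hpr
            rcases List.mem_map.1 hpr with ⟨w, hw, rfl⟩
            simp only [beq_iff_eq]
            exact hfresh w (reps_subset _ _ hw)
        rw [hget]
        show ((PySem.Dict.mk ((reps p).map (fun x => (pvK x, rec0 p x)))).insert (pvK z) z).items
            = (reps (p ++ [z])).map (fun x => (pvK x, rec0 (p ++ [z]) x))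
        unfold PySem.Dict.insert PySem.Dict.contains
        rw [if_neg]
        · rw [reps_append_fresh z p hfresh, List.map_append]
          refine congr_arg₂ (· ++ ·) ?_ ?_
          · apply List.map_congr_left
            intro w hw
            rw [rec0_append_other p z w (fun hh => hfresh w (reps_subset _ _ hw) hh.symm)]
          · simp only [List.map_cons, List.map_nil]
            have hzz : rec0 (p ++ [z]) z = z := by
              have hcl : p.filter (fun y => decide (pvK y = pvK z)) = [] := by
                rw [List.filter_eq_nil_iff]
                intro y hy
                simp only [decide_eq_true_eq]
                exact hfresh y hy
              unfold rec0
              rw [List.filter_append, hcl, List.nil_append]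
              simp [pvS_pvV_self]
            rw [hzz]
        · simp only [List.any_eq_true, not_exists]
          intro pr
          rintro ⟨hpr, hpr2⟩
          rcases List.mem_map.1 hpr with ⟨w, hw, rfl⟩
          simp only [beq_iff_eq] at hpr2
          exact hfresh w (reps_subset _ _ hw) hpr2
      · -- existing key: the unique record with that key is updated in place
        have hex : ∃ y ∈ p, pvK y = pvK z := by
          by_contra hno
          exact hfresh (fun y hy hk => hno ⟨y, hy, hk⟩)
        rcases hex with ⟨y0, hy0, hy0k⟩
        rcases reps_exists_key p (pvK z) ⟨y0, hy0, hy0k⟩ with ⟨w, hw, hwk⟩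
        have hpair : (reps p).Pairwise (fun a b => pvK a ≠ pvK b) := reps_keys_pairwise p
        have hsymm : Symmetric (fun a b : List Int => pvK a ≠ pvK b) :=
          fun a b h => fun he => h he.symm
        have huniq : ∀ v ∈ reps p, pvK v = pvK z → v = w := by
          intro v hv hvk
          by_contra hne
          exact (List.Pairwise.forall hsymm hpair hv hw hne) (hvk.trans hwk.symm)
        have hget : (PySem.Dict.mk ((reps p).map (fun x => (pvK x, rec0 p x)))).get? (pvK z)
            = some (rec0 p w) := by
          unfold PySem.Dict.get?
          have hfind : ((reps p).map (fun x => (pvK x, rec0 p x))).find? (fun pr => pr.1 == pvK z)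
              = some (pvK w, rec0 p w) := by
            rw [List.find?_map]
            rw [find?_unique (reps p) _ w hw (by simp [hwk])
              (fun v hv hqv => huniq v hv (by simpa using hqv))]
            rfl
          rw [hfind]
          rfl
        rw [hget]
        show ((PySem.Dict.mk ((reps p).map (fun x => (pvK x, rec0 p x)))).insert (pvK z)
            (pvS (rec0 p w) (pvV (rec0 p w) + pvV z))).items
            = (reps (p ++ [z])).map (fun x => (pvK x, rec0 (p ++ [z]) x))
        unfold PySem.Dict.insert PySem.Dict.contains
        rw [if_pos]
        · rw [reps_append_dup z p ⟨y0, hy0, hy0k⟩, List.map_map]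
          apply List.map_congr_left
          intro v hv
          simp only [Function.comp]
          by_cases hvz : pvK v = pvK z
          · have hvw : v = w := huniq v hv hvz
            rw [if_pos (by simp [hvz])]
            subst hvw
            have h2v : 2 ≤ v.length := hlen2p v (reps_subset _ _ hv)
            rw [rec0_append_same p z v hvz.symm]
            unfold rec0
            rw [pvV_pvS _ _ h2v, pvS_pvS, hvz]
          · rw [if_neg (by simp [hvz])]
            rw [rec0_append_other p z v (fun h => hvz h.symm)]
        · simp only [List.any_eq_true]
          refine ⟨(pvK w, rec0 p w), List.mem_map_of_mem hw, by simp [hwk]⟩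

-- ---------- stability of the reverse sort on key classes ----------
theorem insertBy_filter_class (k : Int) (x : List Int) : ∀ (acc : List (List Int)),
    acc.Pairwise (fun a b => pvK b ≤ pvK a) →
    (PySem.List.insertBy (fun a b => decide (pvK b < pvK a)) x acc).filter (fun y => pvK y == k)
    = if pvK x = k then acc.filter (fun y => pvK y == k) ++ [x] else acc.filter (fun y => pvK y == k) := by
  intro acc
  induction acc with
  | nil =>
      intro _
      by_cases hx : pvK x = k
      · rw [if_pos hx]; simp [PySem.List.insertBy, hx]
      · rw [if_neg hx]; simp [PySem.List.insertBy, hx]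
  | cons y acc ih =>
      intro hpw
      have hy : ∀ z ∈ acc, pvK z ≤ pvK y := (List.pairwise_cons.1 hpw).1
      have htl : acc.Pairwise (fun a b => pvK b ≤ pvK a) := (List.pairwise_cons.1 hpw).2
      show (if decide (pvK y < pvK x) = true then x :: y :: acc
            else y :: PySem.List.insertBy (fun a b => decide (pvK b < pvK a)) x acc).filter
              (fun y => pvK y == k) = _
      by_cases hlt : pvK y < pvK x
      · rw [if_pos (by simpa using hlt)]
        by_cases hx : pvK x = k
        · rw [if_pos hx]
          have hempty : (y :: acc).filter (fun z => pvK z == k) = [] := by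
            rw [List.filter_eq_nil_iff]
            intro z hz
            simp only [beq_iff_eq]
            rcases List.mem_cons.1 hz with rfl | hz'
            · intro h
              rw [h, hx] at hlt
              exact lt_irrefl k hlt
            · intro h
              have h1 := hy z hz'
              rw [h] at h1
              have h2 := lt_of_le_of_lt h1 hlt
              rw [hx] at h2
              exact lt_irrefl k h2
          rw [List.filter_cons, if_pos (by simp [hx]), hempty]
          rfl
        · rw [if_neg hx]
          rw [List.filter_cons, if_neg (by simp [hx])]
      · rw [if_neg (by simpa using hlt)]
        rw [List.filter_cons, List.filter_cons]
        rw [ih htl]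
        by_cases hx : pvK x = k
        · rw [if_pos hx, if_pos hx]
          cases hyk : (pvK y == k) <;> simp
        · rw [if_neg hx, if_neg hx]

theorem sorted_rev_filter_class (k : Int) (xs : List (List Int)) :
    (PySem.List.sorted xs pvK true).filter (fun y => pvK y == k) = xs.filter (fun y => pvK y == k) := by
  induction xs using List.reverseRecOn with
  | nil => rfl
  | append_singleton xs x ih =>
      rw [PySem.List.sorted_rev_eq_foldl_insertBy, List.foldl_append, List.foldl_cons, List.foldl_nil]
      rw [← PySem.List.sorted_rev_eq_foldl_insertBy]
      rw [insertBy_filter_class k x (PySem.List.sorted xs pvK true) (PySem.List.sorted_pairwise_rev xs pvK)]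
      rw [List.filter_append]
      by_cases hx : pvK x = k
      · rw [if_pos hx, ih]
        congr 1
        simp [hx]
      · rw [if_neg hx, ih]
        have : [x].filter (fun y => pvK y == k) = [] := by simp [hx]
        rw [this, List.append_nil]

-- ---------- final assembly ----------
theorem rec0_congr_perm (l l' : List (List Int)) (h : l.Perm l') : rec0 l = rec0 l' := by
  funext x
  unfold rec0
  congr 1
  exact List.Perm.sum_eq ((h.filter _).map _)

theorem reps_perm_of_sorted (res : List (List Int)) :
    (reps (PySem.List.sorted res pvK true)).Perm (reps res) := by
  have hnodup : ∀ (l : List (List Int)), (reps l).Nodup := by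
    intro l
    exact (reps_keys_pairwise l).imp (fun h => fun he => h (he ▸ rfl))
  apply List.perm_of_nodup_nodup_toFinset_eq (hnodup _) (hnodup _)
  apply Finset.ext
  intro x
  simp only [List.mem_toFinset]
  rw [reps_mem_iff, reps_mem_iff, sorted_rev_filter_class]

theorem gA_eq_sorted_gB (res : List (List Int)) :
    PySem.List.sorted (((reps res).map (rec0 res)).filter (fun x => pvV x != 0)) pvK true
    = ((reps (PySem.List.sorted res pvK true)).map (rec0 (PySem.List.sorted res pvK true))).filter
        (fun x => pvV x != 0) := by
  apply PySem.List.sorted_rev_eq_of_perm_of_pairwise_gt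
  · -- the two group lists are permutations of each other
    rw [rec0_congr_perm (PySem.List.sorted res pvK true) res (PySem.List.sorted_perm res pvK true)]
    exact ((reps_perm_of_sorted res).map _).filter _
  · -- the groups from the sorted list are strictly key-descending
    apply List.Pairwise.filter
    rw [List.pairwise_map]
    have h1 : (reps (PySem.List.sorted res pvK true)).Pairwise (fun a b => pvK b ≤ pvK a) :=
      List.Pairwise.sublist (reps_sublist _) (PySem.List.sorted_pairwise_rev res pvK)
    have h2 := reps_keys_pairwise (PySem.List.sorted res pvK true)
    have h3 := h1.and h2
    apply h3.imp
    intro a b hab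
    unfold rec0
    rw [pvK_pvS, pvK_pvS]
    exact lt_of_le_of_ne hab.1 (fun he => hab.2 he.symm)

theorem pyKey_eq : (fun x : List Int => PySem.List.pyGetD x 0 0) = pvK :=
  funext (fun x => by simp [pvK, PySem.List.pyGetD_ofNat'])

theorem pyVal_eq : (fun x : List Int => PySem.List.pyGetD x 1 0) = pvV :=
  funext (fun x => by simp [pvV, PySem.List.pyGetD_ofNat'])

theorem pyPred_eq : (fun x : List Int => PySem.List.pyGetD x 1 0 != 0) = (fun x => pvV x != 0) :=
  funext (fun x => by simp [pvV, PySem.List.pyGetD_ofNat'])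

theorem rank_result_eq (res : List (List Int)) :
    rank_result res = PySem.List.sorted ((combineN (PySem.List.sorted res pvK true).length
      (PySem.List.sorted res pvK true)).filter (fun x => pvV x != 0)) pvV true := by
  unfold rank_result
  simp only [pyKey_eq, pyVal_eq, pyPred_eq]
  rw [portA_combine]

theorem rank_result_alt_eq (res : List (List Int)) (hpre : ∀ y ∈ res, 2 ≤ y.length) :
    rank_result_alt res = PySem.List.sorted (PySem.List.sorted
      (((reps res).map (rec0 res)).filter (fun x => pvV x != 0)) pvK true) pvV true := by
  unfold rank_result_alt
  simp only [pyKey_eq, pyVal_eq, pyPred_eq]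
  have hstep : (fun (d : PySem.Dict Int (List Int)) (x : List Int) =>
      match d.get? (PySem.List.pyGetD x 0 0) with
      | none => d.insert (PySem.List.pyGetD x 0 0) x
      | some g => d.insert (PySem.List.pyGetD x 0 0)
          (g.set 1 (PySem.List.pyGetD g 1 0 + PySem.List.pyGetD x 1 0)))
      = (fun (d : PySem.Dict Int (List Int)) x =>
      match d.get? (pvK x) with
      | none => d.insert (pvK x) x
      | some g => d.insert (pvK x) (pvS g (pvV g + pvV x))) := by
    funext d x
    simp [pvK, pvV, pvS, PySem.List.pyGetD_ofNat']
  rw [hstep]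
  have hvals : (res.foldl (fun (d : PySem.Dict Int (List Int)) x =>
      match d.get? (pvK x) with
      | none => d.insert (pvK x) x
      | some g => d.insert (pvK x) (pvS g (pvV g + pvV x))) PySem.Dict.empty).values
      = (reps res).map (rec0 res) := by
    unfold PySem.Dict.values
    rw [dict_invariant res hpre, List.map_map]
    rfl
  rw [hvals]

theorem rank_result_spec : Claim_equal_rank_result := by
  intro res _ hpre
  show rank_result res = rank_result_alt res
  rw [rank_result_eq, rank_result_alt_eq res hpre]
  rw [combineN_eq_spec (PySem.List.sorted res pvK true)]
  have hmem : ∀ y ∈ PySem.List.sorted res pvK true, 2 ≤ y.length := by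
    intro y hy
    exact hpre y ((PySem.List.mem_sorted res pvK true y).1 hy)
  rw [step2 _ hmem]
  rw [← gA_eq_sorted_gB res]
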